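-- pv_equiv track=rewrite | github.com/swappimittal/PPset_2 | PPSET_functions.py | generate_master_probe_list
-- ===== SOURCE A (Python) =====
-- def generate_master_probe_list(sub_sequences, valid_permutations):
--     master_probe_list = []
--
--     for sub_sequence in sub_sequences:
--         sub_sequence_LNA = []
--         for perm in valid_permutations:
--             if len(sub_sequence) == len(perm):
--                 modified_sequence = []
--                 for i in range(len(sub_sequence)):
--                     if perm[i] == '0':
--                         modified_sequence.append(sub_sequence[i])
--                     if perm[i] == '1':
--                         modified_sequence.append("+" + sub_sequence[i])
--                 master_probe_list.append(modified_sequence)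
--
--     filtered_master_probe_list = []
--     for sub_sequence in master_probe_list:
--         exclude_sub_sequence = False
--         for base in sub_sequence:
--             if base[0] == "*":
--                 exclude_sub_sequence = True
--                 break
--         if not exclude_sub_sequence:
--             filtered_master_probe_list.append(sub_sequence)
--
--     return filtered_master_probe_list
-- ===== SOURCE B (Python) =====
-- def generate_master_probe_list(sub_sequences, valid_permutations):
--     return [
--         [c if pc == '0' else '+' + c for pc, c in zip(p, s) if pc in ('0', '1')]
--         for s in sub_sequences
--         for p in valid_permutations
--         if len(p) == len(s)
--         and not any(pc == '0' and c == '*' for pc, c in zip(p, s))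
--     ]
-- ===== Notes on version B (the rewrite author's own statement) =====
-- stated objective: simpler
-- what changed: B is a single flat comprehension: it decides exclusion up front by zipping perm with the sub-sequence (perm char '0' against a '*' base) and builds each kept probe directly, instead of A's two-phase build-everything-then-filter with an intermediate master list and a second scan over the built bases.
import Mathlib
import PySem

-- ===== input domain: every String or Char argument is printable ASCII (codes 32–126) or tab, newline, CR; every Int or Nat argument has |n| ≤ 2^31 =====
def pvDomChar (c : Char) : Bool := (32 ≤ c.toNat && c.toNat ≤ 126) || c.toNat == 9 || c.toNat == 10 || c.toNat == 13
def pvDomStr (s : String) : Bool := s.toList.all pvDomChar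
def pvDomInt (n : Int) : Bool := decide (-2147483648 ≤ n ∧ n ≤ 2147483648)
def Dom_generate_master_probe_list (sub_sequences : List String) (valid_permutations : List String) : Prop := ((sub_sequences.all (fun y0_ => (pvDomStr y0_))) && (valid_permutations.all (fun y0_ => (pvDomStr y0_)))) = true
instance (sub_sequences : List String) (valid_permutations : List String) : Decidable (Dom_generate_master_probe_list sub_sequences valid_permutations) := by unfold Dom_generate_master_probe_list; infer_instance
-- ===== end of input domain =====

-- B replaces A's two-phase build-then-filter (intermediate master list, second scan over built
-- bases) by a single flat pass that decides exclusion up front on the zipped inputs; objective: simpler.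

-- ===== PORT A =====
-- inner index loop: for i in range(len(sub_sequence)): append sub_sequence[i] / '+'+sub_sequence[i]
-- (indices are always in range since the caller checks len(sub_sequence) == len(perm),
--  so List.getD returns exactly the Python character)
def pvBuildA (s p : List Char) : List String :=
  (List.range s.length).foldl (fun acc i =>
    let acc := if p.getD i ' ' = '0' then acc ++ [String.ofList [s.getD i ' ']] else acc
    if p.getD i ' ' = '1' then acc ++ [String.ofList ['+', s.getD i ' ']] else acc) []

-- master_probe_list: both Python loops append into the one shared accumulator
def pvMasterA (sub_sequences : List String) (valid_permutations : List String) : List (List String) :=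
  sub_sequences.foldl (fun acc s =>
    valid_permutations.foldl (fun acc2 q =>
      if s.toList.length = q.toList.length then acc2 ++ [pvBuildA s.toList q.toList] else acc2) acc) []

def generate_master_probe_list (sub_sequences : List String) (valid_permutations : List String) : List (List String) :=
  -- second pass: the exclude-flag/break loop is the value-equivalent flag fold
  -- (base[0] == '*': the bases built above are never empty, so getD 0 is exact)
  (pvMasterA sub_sequences valid_permutations).foldl (fun acc seq =>
      if (seq.foldl (fun ex base => if base.toList.getD 0 ' ' = '*' then true else ex) false) = false
      then acc ++ [seq] else acc) []

-- ===== PORT B =====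
-- element builder of B's comprehension: c if pc=='0' else '+'+c ... if pc in ('0','1')
def pvZf (pc : Char × Char) : Option String :=
  if pc.1 = '0' then some (String.ofList [pc.2])
  else if pc.1 = '1' then some (String.ofList ['+', pc.2]) else none

def generate_master_probe_list_alt (sub_sequences : List String) (valid_permutations : List String) : List (List String) :=
  sub_sequences.flatMap (fun s =>
    valid_permutations.filterMap (fun q =>
      if q.toList.length = s.toList.length ∧
         ¬ ((q.toList.zip s.toList).any (fun pc => pc.1 == '0' && pc.2 == '*')) = true
      then some ((q.toList.zip s.toList).filterMap pvZf)
      else none))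

-- ===== PRECONDITION & SPEC =====
def Spec_generate_master_probe_list (sub_sequences : List String) (valid_permutations : List String) (out : List (List String)) : Prop := out = generate_master_probe_list_alt sub_sequences valid_permutations
instance (sub_sequences : List String) (valid_permutations : List String) (out : List (List String)) : Decidable (Spec_generate_master_probe_list sub_sequences valid_permutations out) := by unfold Spec_generate_master_probe_list; infer_instance

-- ===== CLAIM (what is proved, stated in full; the proofs are below) =====
def Claim_equal_generate_master_probe_list : Prop := ∀ (sub_sequences : List String) (valid_permutations : List String), Dom_generate_master_probe_list sub_sequences valid_permutations → Spec_generate_master_probe_list sub_sequences valid_permutations (generate_master_probe_list sub_sequences valid_permutations)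

-- ===== LEMMAS AND PROOFS =====

-- A's index loop equals B's zip filterMap (generalized over the prefix length)
theorem pvBuildA_take (s p : List Char) (h : p.length = s.length) :
    ∀ k, k ≤ s.length →
      (List.range k).foldl (fun acc i =>
        let acc := if p.getD i ' ' = '0' then acc ++ [String.ofList [s.getD i ' ']] else acc
        if p.getD i ' ' = '1' then acc ++ [String.ofList ['+', s.getD i ' ']] else acc) []
      = ((p.zip s).take k).filterMap pvZf := by
  intro k
  induction k with
  | zero => intro _; simp
  | succ k ih =>
    intro hk
    have hks : k < s.length := hk
    have hkp : k < p.length := by omega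
    rw [List.range_succ, List.foldl_append, ih (by omega)]
    have hz : k < (p.zip s).length := by simp [List.length_zip]; omega
    have ht : (p.zip s).take (k + 1) = (p.zip s).take k ++ [(p[k], s[k])] := by
      rw [List.take_add_one]
      simp [List.getElem?_eq_getElem hz]
    rw [ht, List.filterMap_append]
    simp only [List.foldl_cons, List.foldl_nil, List.getD_eq_getElem?_getD,
      List.getElem?_eq_getElem hkp, List.getElem?_eq_getElem hks, Option.getD_some]
    by_cases h0 : p[k] = '0'
    · by_cases h1 : p[k] = '1'
      · exact absurd (h0 ▸ h1) (by decide)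
      · simp [pvZf, h0]
    · by_cases h1 : p[k] = '1' <;> simp [pvZf, h0, h1]

theorem pvBuildA_eq (s p : List Char) (h : p.length = s.length) :
    pvBuildA s p = (p.zip s).filterMap pvZf := by
  have hlen : (p.zip s).length ≤ s.length := by
    simp [List.length_zip]
  rw [pvBuildA, pvBuildA_take s p h s.length le_rfl, List.take_of_length_le hlen]

-- the exclude-flag fold over the built bases IS the any-test on the zipped inputs
theorem pvExcl_eq (l : List (Char × Char)) : ∀ (b : Bool),
    (l.filterMap pvZf).foldl (fun ex base => if base.toList.getD 0 ' ' = '*' then true else ex) b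
    = (b || l.any (fun pc => pc.1 == '0' && pc.2 == '*')) := by
  induction l with
  | nil => intro b; simp
  | cons pc t ih =>
    intro b
    by_cases h0 : pc.1 = '0'
    · have hz : pvZf pc = some (String.ofList [pc.2]) := by simp [pvZf, h0]
      rw [List.filterMap_cons, hz]
      simp only [List.foldl_cons]
      rw [show (if (String.ofList [pc.2]).toList.getD 0 ' ' = '*' then true else b)
            = (b || (pc.1 == '0' && pc.2 == '*')) from ?_]
      · rw [ih, List.any_cons, Bool.or_assoc]
      · by_cases hs : pc.2 = '*' <;> simp [h0, hs]
    · have hhead : (pc.1 == '0' && pc.2 == '*') = false := by simp [h0]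
      by_cases h1 : pc.1 = '1'
      · have hz : pvZf pc = some (String.ofList ['+', pc.2]) := by simp [pvZf, h1]
        rw [List.filterMap_cons, hz]
        simp only [List.foldl_cons]
        rw [show (if (String.ofList ['+', pc.2]).toList.getD 0 ' ' = '*' then true else b) = b by simp]
        rw [ih, List.any_cons, hhead, Bool.false_or]
      · have hz : pvZf pc = none := by simp [pvZf, h0, h1]
        rw [List.filterMap_cons, hz, ih, List.any_cons, hhead, Bool.false_or]

-- A's inner perm loop equals a filterMap
theorem pvInner_eq (perms : List String) (s : String) : ∀ (acc : List (List String)),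
    perms.foldl (fun acc2 q =>
        if s.toList.length = q.toList.length then acc2 ++ [pvBuildA s.toList q.toList] else acc2) acc
    = acc ++ perms.filterMap (fun q =>
        if s.toList.length = q.toList.length then some (pvBuildA s.toList q.toList) else none) := by
  induction perms with
  | nil => intro acc; simp
  | cons q t ih =>
    intro acc
    rw [List.foldl_cons, List.filterMap_cons]
    by_cases h : s.toList.length = q.toList.length
    · rw [if_pos h, if_pos h, ih, List.append_assoc, List.singleton_append]
    · rw [if_neg h, if_neg h, ih]

-- the whole master build equals a flatMap of filterMaps
theorem pvMasterA_eq (sub_sequences perms : List String) :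
    pvMasterA sub_sequences perms
    = sub_sequences.flatMap (fun s => perms.filterMap (fun q =>
        if s.toList.length = q.toList.length then some (pvBuildA s.toList q.toList) else none)) := by
  suffices h : ∀ (acc : List (List String)),
      sub_sequences.foldl (fun acc s =>
        perms.foldl (fun acc2 q =>
          if s.toList.length = q.toList.length then acc2 ++ [pvBuildA s.toList q.toList] else acc2) acc) acc
      = acc ++ sub_sequences.flatMap (fun s => perms.filterMap (fun q =>
          if s.toList.length = q.toList.length then some (pvBuildA s.toList q.toList) else none)) by
    rw [pvMasterA, h, List.nil_append]
  induction sub_sequences with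
  | nil => intro acc; simp
  | cons s t ih =>
    intro acc
    rw [List.foldl_cons, List.flatMap_cons, pvInner_eq, ih, List.append_assoc]

-- the filter pass is List.filter
theorem pvFilterPass_eq (master : List (List String)) : ∀ (acc : List (List String)),
    master.foldl (fun acc seq =>
        if (seq.foldl (fun ex base => if base.toList.getD 0 ' ' = '*' then true else ex) false) = false
        then acc ++ [seq] else acc) acc
    = acc ++ master.filter (fun seq =>
        !(seq.foldl (fun ex base => if base.toList.getD 0 ' ' = '*' then true else ex) false)) := by
  induction master with
  | nil => intro acc; simp
  | cons seq t ih =>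
    intro acc
    rw [List.foldl_cons, List.filter_cons]
    by_cases h : (seq.foldl (fun ex base => if base.toList.getD 0 ' ' = '*' then true else ex) false) = false
    · have hp : (!(seq.foldl (fun ex base => if base.toList.getD 0 ' ' = '*' then true else ex) false)) = true := by
        rw [h]; rfl
      rw [if_pos h, ih, List.append_assoc, List.singleton_append, if_pos hp]
    · have hx : (seq.foldl (fun ex base => if base.toList.getD 0 ' ' = '*' then true else ex) false) = true := by
        revert h
        cases seq.foldl (fun ex base => if base.toList.getD 0 ' ' = '*' then true else ex) false <;> simp
      have hp : ¬ (!(seq.foldl (fun ex base => if base.toList.getD 0 ' ' = '*' then true else ex) false)) = true := by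
        rw [hx]; decide
      rw [if_neg h, ih, if_neg hp]

-- filter distributes over flatMap
theorem pvFilter_flatMap {α β : Type} (l : List α) (g : α → List β) (q : β → Bool) :
    (l.flatMap g).filter q = l.flatMap (fun x => (g x).filter q) := by
  induction l with
  | nil => rfl
  | cons x t ih => simp [List.flatMap_cons, List.filter_append, ih]

-- per sub-sequence: filtering the built probes = B's filterMap with the up-front test
theorem pvPer_s (perms : List String) (s : String) :
    (perms.filterMap (fun q =>
        if s.toList.length = q.toList.length then some (pvBuildA s.toList q.toList) else none)).filter
      (fun seq => !(seq.foldl (fun ex base => if base.toList.getD 0 ' ' = '*' then true else ex) false))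
    = perms.filterMap (fun q =>
        if q.toList.length = s.toList.length ∧
           ¬ ((q.toList.zip s.toList).any (fun pc => pc.1 == '0' && pc.2 == '*')) = true
        then some ((q.toList.zip s.toList).filterMap pvZf)
        else none) := by
  induction perms with
  | nil => rfl
  | cons q t ih =>
    rw [List.filterMap_cons, List.filterMap_cons]
    by_cases hlen : s.toList.length = q.toList.length
    · rw [if_pos hlen, List.filter_cons]
      have hany : (pvBuildA s.toList q.toList).foldl
          (fun ex base => if base.toList.getD 0 ' ' = '*' then true else ex) false
          = (q.toList.zip s.toList).any (fun pc => pc.1 == '0' && pc.2 == '*') := by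
        rw [pvBuildA_eq s.toList q.toList hlen.symm, pvExcl_eq, Bool.false_or]
      by_cases hstar : ((q.toList.zip s.toList).any (fun pc => pc.1 == '0' && pc.2 == '*')) = true
      · have hb : ¬ (!(pvBuildA s.toList q.toList).foldl
            (fun ex base => if base.toList.getD 0 ' ' = '*' then true else ex) false) = true := by
          rw [hany, hstar]; decide
        have hc : ¬ (q.toList.length = s.toList.length ∧
            ¬ ((q.toList.zip s.toList).any (fun pc => pc.1 == '0' && pc.2 == '*')) = true) :=
          fun hcc => hcc.2 hstar
        rw [if_neg hb, if_neg hc, ih]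
      · have hb : (!(pvBuildA s.toList q.toList).foldl
            (fun ex base => if base.toList.getD 0 ' ' = '*' then true else ex) false) = true := by
          rw [hany]
          simp only [Bool.not_eq_true] at hstar
          rw [hstar]; rfl
        have hc : q.toList.length = s.toList.length ∧
            ¬ ((q.toList.zip s.toList).any (fun pc => pc.1 == '0' && pc.2 == '*')) = true :=
          ⟨hlen.symm, hstar⟩
        rw [if_pos hb, if_pos hc, pvBuildA_eq s.toList q.toList hlen.symm, ih]
    · rw [if_neg hlen, if_neg (fun hc => hlen hc.1.symm), ih]

-- ===== VERDICT (by name: the statement is the Claim_ definition above) =====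
theorem generate_master_probe_list_spec : Claim_equal_generate_master_probe_list := by
  intro subs perms _
  unfold Spec_generate_master_probe_list generate_master_probe_list generate_master_probe_list_alt
  rw [pvMasterA_eq, pvFilterPass_eq, List.nil_append, pvFilter_flatMap]
  exact congrArg subs.flatMap (funext fun s => pvPer_s perms s)
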